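-- pv_equiv track=rewrite | github.com/RichardGeh/KAI-Kognitive_Artifical_Intelligence | component_45_logic_puzzle_solver_core.py | _solve_circular_constraints
-- ===== SOURCE A (Python) =====
-- from typing import Any, Dict, List, Optional
--
-- def _solve_circular_constraints(
--     entities: List[str], n: int, constraints: List[Dict]
-- ) -> Optional[Dict[str, int]]:
--     """
--     Solve circular seating via backtracking with constraint checking.
--
--     Args:
--         entities: List of entity names (lowercase)
--         n: Number of positions (same as number of entities)
--         constraints: List of constraint dicts
--
--     Returns:
--         Dict mapping entity name to position (0-indexed), or None
--     """
--
--     def check_constraint(assignment: Dict[str, int], c: Dict) -> bool: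
--         """Check if a constraint is satisfied by the current assignment."""
--         ctype = c["type"]
--         p1 = c.get("person1")
--         p2 = c.get("person2")
--
--         if p1 not in assignment or (p2 and p2 not in assignment):
--             return True  # Not yet assigned, assume OK
--
--         pos1 = assignment[p1]
--         pos2 = assignment.get(p2, -1)
--
--         if ctype == "opposite":
--             # Opposite = exactly n/2 apart (mod n)
--             diff = abs(pos1 - pos2)
--             return diff == n // 2 or diff == n - n // 2
--
--         elif ctype == "right_of":
--             # p1 is right of p2 = p1 is at position (p2 + 1) mod n
--             return pos1 == (pos2 + 1) % n
--
--         elif ctype == "left_of":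
--             # p1 is left of p2 = p1 is at position (p2 - 1) mod n
--             return pos1 == (pos2 - 1) % n
--
--         elif ctype == "adjacent":
--             # Adjacent = exactly 1 apart (mod n)
--             diff = abs(pos1 - pos2)
--             return diff == 1 or diff == n - 1
--
--         elif ctype == "not_adjacent":
--             # Not adjacent = not exactly 1 apart
--             diff = abs(pos1 - pos2)
--             return diff != 1 and diff != n - 1
--
--         return True
--
--     def backtrack(
--         assignment: Dict[str, int], remaining: List[str]
--     ) -> Optional[Dict[str, int]]:
--         """Recursive backtracking search."""
--         if not remaining:
--             # All assigned - verify all constraints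
--             for c in constraints:
--                 if not check_constraint(assignment, c):
--                     return None
--             return assignment.copy()
--
--         entity = remaining[0]
--         used_positions = set(assignment.values())
--
--         for pos in range(n):
--             if pos in used_positions:
--                 continue
--
--             assignment[entity] = pos
--
--             # Check constraints involving this entity
--             valid = True
--             for c in constraints:
--                 if c.get("person1") == entity or c.get("person2") == entity:
--                     if not check_constraint(assignment, c):
--                         valid = False
--                         break
--
--             if valid:
--                 result = backtrack(assignment, remaining[1:])
--                 if result is not None:
--                     return result
--
--             del assignment[entity]
--
--         return None
--
--     # Try with the first entity fixed at position 0 (reduces symmetry)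
--     if entities:
--         initial = {entities[0]: 0}
--         return backtrack(initial, entities[1:])
--
--     return None
-- ===== SOURCE B (Python) =====
-- from typing import Any, Dict, List, Optional
--
--
-- def _solve_circular_constraints(
--     entities: List[str], n: int, constraints: List[Dict]
-- ) -> Optional[Dict[str, int]]:
--     """
--     Generate-and-test: fix entities[0] at position 0, enumerate the
--     k-permutations of positions 1..n-1 in lexicographic order, validate each
--     candidate incrementally (checking the constraints naming each entity as
--     soon as it is placed) and fully, and return the first that passes.
--     """
--
--     def check_constraint(assignment: Dict[str, int], c: Dict) -> bool:
--         """Check if a constraint is satisfied by the current assignment."""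
--         ctype = c["type"]
--         p1 = c.get("person1")
--         p2 = c.get("person2")
--
--         if p1 not in assignment or (p2 and p2 not in assignment):
--             return True  # Not yet assigned, assume OK
--
--         pos1 = assignment[p1]
--         pos2 = assignment.get(p2, -1)
--
--         if ctype == "opposite":
--             diff = abs(pos1 - pos2)
--             return diff == n // 2 or diff == n - n // 2
--         elif ctype == "right_of":
--             return pos1 == (pos2 + 1) % n
--         elif ctype == "left_of":
--             return pos1 == (pos2 - 1) % n
--         elif ctype == "adjacent":
--             diff = abs(pos1 - pos2)
--             return diff == 1 or diff == n - 1
--         elif ctype == "not_adjacent":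
--             diff = abs(pos1 - pos2)
--             return diff != 1 and diff != n - 1
--         return True
--
--     def k_permutations(avail: List[int], k: int):
--         """Yield all length-k permutations of avail in lexicographic order."""
--         if k == 0:
--             yield []
--             return
--         for p in avail:
--             rest = [q for q in avail if q != p]
--             for tail in k_permutations(rest, k - 1):
--                 yield [p] + tail
--
--     if not entities:
--         return None
--
--     first, others = entities[0], entities[1:]
--     for perm in k_permutations(list(range(1, n)), len(others)):
--         assignment = {first: 0}
--         ok = True
--         for e, p in zip(others, perm):
--             assignment[e] = p
--             if not all(check_constraint(assignment, c) for c in constraints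
--                        if c.get("person1") == e or c.get("person2") == e):
--                 ok = False
--                 break
--         if ok and all(check_constraint(assignment, c) for c in constraints):
--             return assignment
--     return None
-- ===== Notes on version B (the rewrite author's own statement) =====
-- stated objective: alternative
-- what changed: Replaces the mutating recursive backtracking (shared assignment dict, del on failure, used-position set) by a pure generate-and-test loop that enumerates the lexicographic k-permutations of positions 1..n-1 and validates each candidate incrementally with the same constraint checks; Pre_ excludes duplicate entity names (a dict-key-collision corner where A's answer is an accident of its mutation order) and the inputs where A raises KeyError or ZeroDivisionError.
-- outside the precondition, e.g. on _solve_circular_constraints(['a', 'a'], 2, []): A returns {'a': 1}, B returns {'a': 1}; on _solve_circular_constraints(['a', 'b', 'c'], 2, [{'person2': 'c'}]): A returns None, B returns None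
import Mathlib
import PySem

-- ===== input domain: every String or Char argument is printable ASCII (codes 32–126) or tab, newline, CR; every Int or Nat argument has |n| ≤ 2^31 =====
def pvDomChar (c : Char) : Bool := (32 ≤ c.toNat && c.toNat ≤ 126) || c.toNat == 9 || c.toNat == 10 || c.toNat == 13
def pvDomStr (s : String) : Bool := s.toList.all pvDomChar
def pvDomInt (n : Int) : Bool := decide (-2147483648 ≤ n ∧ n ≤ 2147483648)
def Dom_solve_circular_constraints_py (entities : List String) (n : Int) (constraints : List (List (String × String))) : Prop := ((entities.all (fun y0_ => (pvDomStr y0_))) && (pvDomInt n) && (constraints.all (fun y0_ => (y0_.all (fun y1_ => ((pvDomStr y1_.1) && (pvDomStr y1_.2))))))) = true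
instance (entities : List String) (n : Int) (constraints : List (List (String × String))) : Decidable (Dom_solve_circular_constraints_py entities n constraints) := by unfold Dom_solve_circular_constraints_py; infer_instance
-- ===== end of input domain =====

-- B replaces A's mutating backtracking search by a pure generate-and-test enumeration of the
-- lexicographic k-permutations of positions 1..n-1, validating each candidate incrementally
-- with the same constraint checks (same candidate order, same check logic).


-- ===== PORT A =====
-- check_constraint: textually identical in A and B (B keeps A's check logic), so it is
-- defined once and used by both ports.  c["type"] is ported as a getD "" lookup; Pre_
-- guarantees the key exists (Python raises KeyError otherwise), and Pre_ excludes the one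
-- reachable `% 0` (ZeroDivisionError) case of the right_of/left_of branches.
def check_constraint_py (n : Int) (assignment : PySem.Dict String Int) (c : PySem.Dict String String) : Bool :=
  let ctype := (c.get? "type").getD ""
  let p1 := c.get? "person1"
  let p2 := c.get? "person2"
  -- `if p1 not in assignment or (p2 and p2 not in assignment): return True`
  -- (an absent key gives p1/p2 = None, never in a str-keyed dict; the empty string is falsy)
  let p1absent : Bool := match p1 with
    | none => true
    | some s => !(assignment.contains s)
  let p2absent : Bool := match p2 with
    | none => false
    | some s => !(s == "") && !(assignment.contains s)
  if p1absent || p2absent then true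
  else
    let pos1 : Int := match p1 with
      | none => 0  -- unreachable: p1 is present here
      | some s => assignment.getD s 0
    let pos2 : Int := match p2 with
      | none => -1  -- assignment.get(None, -1)
      | some s => assignment.getD s (-1)
    if ctype == "opposite" then
      let diff := |pos1 - pos2|
      diff == PySem.Int.floordiv n 2 || diff == n - PySem.Int.floordiv n 2
    else if ctype == "right_of" then
      pos1 == PySem.Int.mod (pos2 + 1) n
    else if ctype == "left_of" then
      pos1 == PySem.Int.mod (pos2 - 1) n
    else if ctype == "adjacent" then
      let diff := |pos1 - pos2|
      diff == 1 || diff == n - 1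
    else if ctype == "not_adjacent" then
      let diff := |pos1 - pos2|
      diff != 1 && diff != n - 1
    else true

mutual
-- backtrack(assignment, remaining)
def bt_py (n : Int) (constraints : List (List (String × String))) (assignment : PySem.Dict String Int) : List String → Option (List (String × Int))
  | [] =>
      if constraints.all (fun c => check_constraint_py n assignment (PySem.Dict.mk c))
      then some assignment.items else none
  | entity :: rest =>
      btloop_py n constraints entity rest assignment
        (PySem.Set.ofList assignment.values) (PySem.List.pyRange 0 n 1)
  termination_by remaining => (remaining.length, 1, 0)

-- the `for pos in range(n)` loop of backtrack
def btloop_py (n : Int) (constraints : List (List (String × String))) (entity : String) (rest : List String) (assignment : PySem.Dict String Int) (used : PySem.Set Int) : List Int → Option (List (String × Int))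
  | [] => none
  | pos :: ps =>
      if used.contains pos then
        btloop_py n constraints entity rest assignment used ps
      else
        let a1 := assignment.insert entity pos
        let valid := constraints.all (fun c =>
          if (PySem.Dict.mk c).get? "person1" == some entity || (PySem.Dict.mk c).get? "person2" == some entity
          then check_constraint_py n a1 (PySem.Dict.mk c) else true)
        if valid then
          match bt_py n constraints a1 rest with
          | some r => some r
          | none => btloop_py n constraints entity rest (a1.erase entity) used ps
        else btloop_py n constraints entity rest (a1.erase entity) used ps
  termination_by ps => (rest.length + 1, 0, ps.length)

end

def solve_circular_constraints_py (entities : List String) (n : Int) (constraints : List (List (String × String))) : Option (List (String × Int)) :=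
  match entities with
  | e0 :: rest => bt_py n constraints (PySem.Dict.mk [(e0, 0)]) rest
  | [] => none

-- ===== PORT B =====
-- k_permutations(avail, k): lexicographic k-permutations (hand-written generator in Source B)
def k_permutations_py : List Int → Nat → List (List Int)
  | _, 0 => [[]]
  | avail, k+1 =>
      avail.flatMap (fun p =>
        (k_permutations_py (avail.filter (fun q => !(q == p))) k).map (fun tail => p :: tail))

-- `all(check_constraint(assignment, c) for c in constraints if c.get("person1") == e or c.get("person2") == e)`
def prune_ok_py (n : Int) (constraints : List (List (String × String))) (e : String) (a : PySem.Dict String Int) : Bool :=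
  constraints.all (fun c =>
    if (PySem.Dict.mk c).get? "person1" == some e || (PySem.Dict.mk c).get? "person2" == some e
    then check_constraint_py n a (PySem.Dict.mk c) else true)

-- the inner `for e, p in zip(others, perm)` loop of Source B: build the assignment,
-- checking the constraints naming each entity as soon as it is placed (none = `ok = False`)
def build_check_py (n : Int) (constraints : List (List (String × String))) : PySem.Dict String Int → List (String × Int) → Option (PySem.Dict String Int)
  | a, [] => some a
  | a, (e, p) :: zs =>
      let a1 := a.insert e p
      if prune_ok_py n constraints e a1 then build_check_py n constraints a1 zs else none

-- the outer `for perm in k_permutations(...)` loop of Source B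
def try_perms_py (n : Int) (constraints : List (List (String × String))) (base : PySem.Dict String Int) (others : List String) : List (List Int) → Option (List (String × Int))
  | [] => none
  | perm :: ps =>
      match build_check_py n constraints base (others.zip perm) with
      | none => try_perms_py n constraints base others ps
      | some a =>
          if constraints.all (fun c => check_constraint_py n a (PySem.Dict.mk c))
          then some a.items
          else try_perms_py n constraints base others ps

def solve_circular_constraints_py_alt (entities : List String) (n : Int) (constraints : List (List (String × String))) : Option (List (String × Int)) :=
  match entities with
  | [] => none
  | e0 :: others =>
      try_perms_py n constraints (PySem.Dict.mk [(e0, 0)]) others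
        (k_permutations_py (PySem.List.pyRange 1 n 1) others.length)

-- ===== PRECONDITION & SPEC =====
-- Pre_ admits outright any input with n ≤ 1 and ≥ 2 entities (both searches run out of
-- positions and return None before any constraint check).  Otherwise it excludes
-- (a) duplicate entity names — a dict-key-collision corner on which A's answer is an
-- accident of its dict mutation (`del` removes the earlier assignment too); and (b) the
-- inputs on which A raises: a constraint without a "type" key raises KeyError as soon as
-- check_constraint is reached (such constraints are allowed only where no check is
-- reachable: no entities, or too few positions and no untyped constraint naming a
-- backtracked entity), and the one corner (n = 0, a single entity, a right_of/left_of
-- constraint on it with person2 missing, empty or equal to it) where A raises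
-- ZeroDivisionError.
def Pre_solve_circular_constraints_py (entities : List String) (n : Int) (constraints : List (List (String × String))) : Prop :=
  (2 ≤ entities.length ∧ n ≤ 1) ∨
  (entities.Nodup ∧
  (((∀ c ∈ constraints, ((PySem.Dict.mk c).get? "type").isSome) ∧
      ¬(n = 0 ∧ entities.length = 1 ∧ ∃ c ∈ constraints,
        ((PySem.Dict.mk c).get? "type" = some "right_of" ∨ (PySem.Dict.mk c).get? "type" = some "left_of")
        ∧ (PySem.Dict.mk c).get? "person1" = entities.head?
        ∧ ((PySem.Dict.mk c).get? "person2" = none ∨ (PySem.Dict.mk c).get? "person2" = some ""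
            ∨ (PySem.Dict.mk c).get? "person2" = entities.head?)))
    ∨ entities = []
    ∨ (2 ≤ entities.length ∧ n < entities.length ∧ ∀ c ∈ constraints,
        ((PySem.Dict.mk c).get? "type").isSome ∨ (∀ e ∈ entities.tail,
          (PySem.Dict.mk c).get? "person1" ≠ some e ∧ (PySem.Dict.mk c).get? "person2" ≠ some e))))
instance (entities : List String) (n : Int) (constraints : List (List (String × String))) : Decidable (Pre_solve_circular_constraints_py entities n constraints) := by unfold Pre_solve_circular_constraints_py; infer_instance

def pvWitness_solve_circular_constraints_py : List String × Int × (List (List (String × String))) :=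
  (["a", "b"], 2, [[("type", "opposite"), ("person1", "a"), ("person2", "b")]])

def Spec_solve_circular_constraints_py (entities : List String) (n : Int) (constraints : List (List (String × String))) (out : Option (List (String × Int))) : Prop := out = solve_circular_constraints_py_alt entities n constraints
instance (entities : List String) (n : Int) (constraints : List (List (String × String))) (out : Option (List (String × Int))) : Decidable (Spec_solve_circular_constraints_py entities n constraints out) := by unfold Spec_solve_circular_constraints_py; infer_instance

-- ===== CLAIM (what is proved, stated in full; the proofs are below) =====
def Claim_equal_solve_circular_constraints_py : Prop := ∀ (entities : List String) (n : Int) (constraints : List (List (String × String))), Dom_solve_circular_constraints_py entities n constraints → Pre_solve_circular_constraints_py entities n constraints → Spec_solve_circular_constraints_py entities n constraints (solve_circular_constraints_py entities n constraints)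

-- ===== LEMMAS AND PROOFS =====

-- Common reference point of both ports: try position lists functionally, with A's/B's
-- shared incremental prune; first hit wins.
def pvS (n : Int) (cs : List (List (String × String))) (a : PySem.Dict String Int) : List String → List Int → Option (List (String × Int))
  | [], _ =>
      if cs.all (fun c => check_constraint_py n a (PySem.Dict.mk c)) then some a.items else none
  | e :: rest, avail =>
      avail.findSome? (fun p =>
        let a1 := a.insert e p
        if prune_ok_py n cs e a1
        then pvS n cs a1 rest (avail.filter (fun q => !(q == p)))
        else none)

-- dict facts specific to this file's fresh-key discipline
theorem dict_values_insert_fresh (a : PySem.Dict String Int) (e : String) (p : Int)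
    (he : a.contains e = false) : (a.insert e p).values = a.values ++ [p] := by
  simp [PySem.Dict.insert, he, PySem.Dict.values]

theorem dict_erase_insert_fresh (a : PySem.Dict String Int) (e : String) (p : Int)
    (he : a.contains e = false) : (a.insert e p).erase e = a := by
  have hall : ∀ x ∈ a.items, (x.1 == e) = false := by
    intro x hx
    have h2 : (a.items.any fun q => q.1 == e) = false := he
    simpa using List.any_eq_false.mp h2 x hx
  apply PySem.Dict.ext
  simp only [PySem.Dict.insert, he]
  simp only [Bool.false_eq_true, if_false, PySem.Dict.erase, List.filter_append]
  rw [List.filter_eq_self.mpr (by intro x hx; simp [hall x hx])]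
  simp

-- the A-side position loop, against the functional spec
theorem btloop_eq (n : Int) (cs : List (List (String × String))) (e : String)
    (rest : List String) (a : PySem.Dict String Int)
    (hre : e ∉ rest)
    (he : a.contains e = false) (hdisj : ∀ x ∈ rest, a.contains x = false)
    (IH : ∀ a' : PySem.Dict String Int, (∀ x ∈ rest, a'.contains x = false) →
      bt_py n cs a' rest =
        pvS n cs a' rest ((PySem.List.pyRange 0 n 1).filter (fun q => !(a'.values.contains q)))) :
    ∀ positions : List Int,
    btloop_py n cs e rest a (PySem.Set.ofList a.values) positions =
      (positions.filter (fun q => !(a.values.contains q))).findSome?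
        (fun p =>
          if prune_ok_py n cs e (a.insert e p)
          then pvS n cs (a.insert e p) rest
            (((PySem.List.pyRange 0 n 1).filter (fun q => !(a.values.contains q))).filter
              (fun q => !(q == p)))
          else none) := by
  have hsetc : ∀ x : Int, (PySem.Set.ofList a.values).contains x = a.values.contains x := by
    intro x
    rw [PySem.Set.contains_eq_listContains, List.contains_eq_mem, List.contains_eq_mem]
    simp [PySem.Set.mem_ofList]
  intro positions
  induction positions with
  | nil => simp [btloop_py]
  | cons pos ps ihp =>
    rw [btloop_py]
    by_cases hu : a.values.contains pos = true
    · rw [if_pos (by rw [hsetc]; exact hu)]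
      rw [ihp, List.filter_cons, hu]
      simp
    · simp only [Bool.not_eq_true] at hu
      rw [if_neg (by rw [hsetc, hu]; simp)]
      have herase : (a.insert e pos).erase e = a := dict_erase_insert_fresh a e pos he
      have hvals : (a.insert e pos).values = a.values ++ [pos] :=
        dict_values_insert_fresh a e pos he
      have hdisj1 : ∀ x ∈ rest, (a.insert e pos).contains x = false := by
        intro x hx
        rw [PySem.Dict.contains_insert]
        have hxe : x ≠ e := fun hEq => hre (hEq ▸ hx)
        simp [hxe, hdisj x hx]
      have hfilter :
          (PySem.List.pyRange 0 n 1).filter (fun q => !((a.insert e pos).values.contains q)) =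
          ((PySem.List.pyRange 0 n 1).filter (fun q => !(a.values.contains q))).filter
            (fun q => !(q == pos)) := by
        rw [List.filter_filter, hvals]
        apply List.filter_congr
        intro x _
        rw [List.contains_append]
        simp [Bool.not_or, Bool.and_comm, beq_eq_decide]
      by_cases hv : prune_ok_py n cs e (a.insert e pos) = true
      · have hv' := hv; rw [prune_ok_py] at hv'
        rw [if_pos hv']
        rw [IH (a.insert e pos) hdisj1, hfilter]
        rw [List.filter_cons, hu]
        simp only [Bool.not_false, if_pos, List.findSome?_cons, hv]
        cases hres : pvS n cs (a.insert e pos) rest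
            (((PySem.List.pyRange 0 n 1).filter (fun q => !(a.values.contains q))).filter
              (fun q => !(q == pos))) with
        | some r => simp
        | none => simp only [herase]; exact ihp
      · have hv' : ¬ ((cs.all fun c =>
            if (PySem.Dict.mk c).get? "person1" == some e || (PySem.Dict.mk c).get? "person2" == some e
            then check_constraint_py n (a.insert e pos) (PySem.Dict.mk c) else true) = true) := by
          rw [← prune_ok_py]; exact hv
        rw [if_neg hv']
        rw [herase, ihp, List.filter_cons, hu]
        simp only [Bool.not_eq_true] at hv
        simp [hv]

theorem bt_eq_pvS (n : Int) (cs : List (List (String × String))) :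
    ∀ (remaining : List String) (a : PySem.Dict String Int),
    remaining.Nodup →
    (∀ e ∈ remaining, a.contains e = false) →
    bt_py n cs a remaining =
      pvS n cs a remaining ((PySem.List.pyRange 0 n 1).filter (fun q => !(a.values.contains q))) := by
  intro remaining
  induction remaining with
  | nil => intro a _ _; simp only [bt_py, pvS]
  | cons e rest ih =>
    intro a hnd hdisj
    obtain ⟨hre, hnd'⟩ := List.nodup_cons.mp hnd
    rw [bt_py]
    rw [btloop_eq n cs e rest a hre (hdisj e (List.mem_cons_self ..))
      (fun x hx => hdisj x (List.mem_cons_of_mem _ hx))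
      (fun a' hd' => ih a' hnd' hd') (PySem.List.pyRange 0 n 1)]
    conv_rhs => rw [pvS]

-- B-side: the permutation enumeration, against the same functional spec
theorem try_perms_append (n : Int) (cs : List (List (String × String)))
    (base : PySem.Dict String Int) (es : List String) (l1 l2 : List (List Int)) :
    try_perms_py n cs base es (l1 ++ l2) =
      match try_perms_py n cs base es l1 with
      | some r => some r
      | none => try_perms_py n cs base es l2 := by
  induction l1 with
  | nil => simp [try_perms_py]
  | cons x l1' ih =>
    simp only [List.cons_append, try_perms_py]
    cases hb : build_check_py n cs base (es.zip x) with
    | none => simp [ih]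
    | some a =>
      by_cases hc : (cs.all fun c => check_constraint_py n a (PySem.Dict.mk c)) = true
      · simp [hc]
      · simp only [Bool.not_eq_true] at hc
        simp [hc, ih]

theorem try_perms_cons_map (n : Int) (cs : List (List (String × String)))
    (base : PySem.Dict String Int) (e : String) (rest : List String) (p : Int)
    (L : List (List Int)) :
    try_perms_py n cs base (e :: rest) (L.map (fun tail => p :: tail)) =
      (if prune_ok_py n cs e (base.insert e p)
       then try_perms_py n cs (base.insert e p) rest L
       else none) := by
  induction L with
  | nil => cases h : prune_ok_py n cs e (base.insert e p) <;> simp [try_perms_py]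
  | cons perm ps ih =>
    simp only [List.map_cons, try_perms_py, List.zip_cons_cons, build_check_py]
    by_cases h : prune_ok_py n cs e (base.insert e p) = true
    · simp only [h, if_true] at ih ⊢
      cases hb : build_check_py n cs (base.insert e p) (rest.zip perm) with
      | none => simpa [try_perms_py] using ih
      | some a =>
        by_cases hc : (cs.all fun c => check_constraint_py n a (PySem.Dict.mk c)) = true
        · simp [hc]
        · simp only [Bool.not_eq_true] at hc
          simpa [try_perms_py, hb, hc] using ih
    · simp only [Bool.not_eq_true] at h
      simp only [h, Bool.false_eq_true, if_false] at ih ⊢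
      exact ih

theorem try_perms_eq_pvS (n : Int) (cs : List (List (String × String))) :
    ∀ (es : List String) (avail : List Int) (a : PySem.Dict String Int),
    try_perms_py n cs a es (k_permutations_py avail es.length) = pvS n cs a es avail := by
  intro es
  induction es with
  | nil => intro avail a; simp [k_permutations_py, try_perms_py, build_check_py, pvS]
  | cons e rest ih =>
    intro avail a
    have key : ∀ (l : List Int),
        try_perms_py n cs a (e :: rest) (l.flatMap (fun p =>
          (k_permutations_py (avail.filter (fun q => !(q == p))) rest.length).map (fun t => p :: t))) =
        l.findSome? (fun p =>
          if prune_ok_py n cs e (a.insert e p)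
          then pvS n cs (a.insert e p) rest (avail.filter (fun q => !(q == p)))
          else none) := by
      intro l
      induction l with
      | nil => simp [try_perms_py]
      | cons p l' ihl =>
        rw [List.flatMap_cons, try_perms_append, try_perms_cons_map]
        by_cases h : prune_ok_py n cs e (a.insert e p) = true
        · rw [if_pos h, ih]
          cases hres : pvS n cs (a.insert e p) rest (avail.filter (fun q => !(q == p))) <;>
            simp [h, hres, ihl]
        · simp only [Bool.not_eq_true] at h
          simp [h, ihl]
    simpa [k_permutations_py, pvS] using key avail

-- positions available after fixing entities[0] at 0
theorem pyRange_filter_zero (n : Int) :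
    (PySem.List.pyRange 0 n 1).filter (fun q => !(([0] : List Int).contains q)) =
      PySem.List.pyRange 1 n 1 := by
  by_cases hn : 0 < n
  · rw [PySem.List.pyRange_one_cons hn]
    simp only [List.filter_cons]
    have h0 : (!(([0] : List Int).contains 0)) = false := by decide
    rw [h0]
    simp only [Bool.false_eq_true, if_false]
    apply List.filter_eq_self.mpr
    intro x hx
    have hx1 := PySem.List.mem_pyRange_one.mp hx
    have hx0 : x ≠ 0 := by omega
    simp [hx0]
  · rw [PySem.List.pyRange_one_eq_nil (by omega), PySem.List.pyRange_one_eq_nil (by omega)]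
    rfl

-- ===== VERDICT (by name: the statement is the Claim_ definition above) =====
theorem solve_circular_constraints_py_spec : Claim_equal_solve_circular_constraints_py := by
  unfold Claim_equal_solve_circular_constraints_py
  intro entities n cs _ hpre
  unfold Spec_solve_circular_constraints_py
  rcases hpre with ⟨hlen, hn1⟩ | ⟨hnd, -⟩
  · -- n ≤ 1 with at least two entities: both searches have no candidate and return none
    match entities, hlen with
    | e0 :: e1 :: tl, _ =>
      have hr1 : PySem.List.pyRange 1 n 1 = [] := PySem.List.pyRange_one_eq_nil (by omega)
      show bt_py n cs (PySem.Dict.mk [(e0, 0)]) (e1 :: tl) =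
        try_perms_py n cs (PySem.Dict.mk [(e0, 0)]) (e1 :: tl)
          (k_permutations_py (PySem.List.pyRange 1 n 1) (e1 :: tl).length)
      have hB : try_perms_py n cs (PySem.Dict.mk [(e0, 0)]) (e1 :: tl)
          (k_permutations_py (PySem.List.pyRange 1 n 1) (e1 :: tl).length) = none := by
        rw [hr1]
        simp [k_permutations_py, try_perms_py]
      rw [hB, bt_py]
      rcases (show n ≤ 0 ∨ n = 1 by omega) with h0 | h1
      · rw [PySem.List.pyRange_one_eq_nil (by omega)]
        simp [btloop_py]
      · subst h1
        have hr0 : PySem.List.pyRange 0 1 1 = [0] := rfl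
        have hv : (PySem.Dict.mk [(e0, 0)] : PySem.Dict String Int).values = [0] := rfl
        rw [hr0, btloop_py, hv, if_pos (by decide), btloop_py]
  · cases entities with
    | nil => rfl
    | cons e0 others =>
      obtain ⟨h0, hnd'⟩ := List.nodup_cons.mp hnd
      have hdisj : ∀ x ∈ others, (PySem.Dict.mk [(e0, 0)] : PySem.Dict String Int).contains x = false := by
        intro x hx
        have hxe : x ≠ e0 := fun hEq => h0 (hEq ▸ hx)
        simp [PySem.Dict.contains, Ne.symm hxe]
      show bt_py n cs (PySem.Dict.mk [(e0, 0)]) others = _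
      rw [bt_eq_pvS n cs others (PySem.Dict.mk [(e0, 0)]) hnd' hdisj]
      have hvals : (PySem.Dict.mk [(e0, 0)] : PySem.Dict String Int).values = [0] := rfl
      rw [hvals, pyRange_filter_zero n]
      show _ = try_perms_py n cs (PySem.Dict.mk [(e0, 0)]) others
        (k_permutations_py (PySem.List.pyRange 1 n 1) others.length)
      rw [try_perms_eq_pvS n cs others (PySem.List.pyRange 1 n 1) (PySem.Dict.mk [(e0, 0)])]
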